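-- pv_equiv track=rewrite | github.com/sean-workman/bioalgs | chapter3/overlap_adjacency.py | overlap_adjacency
-- ===== SOURCE A (Python) =====
-- def overlap_adjacency(patterns):
--     adjacency_list = {}
--     for kmer in patterns:
--         kmer_list = []
--         kmer_suffix= kmer[1:]
--         for query in patterns:
--             if query[:-1] == kmer_suffix:
--                 kmer_list.append(query)
--         if kmer_list:
--             adjacency_list[kmer] = kmer_list
--     return adjacency_list
-- ===== SOURCE B (Python) =====
-- def overlap_adjacency(patterns):
--     # Index every pattern by its (k-1)-prefix once, then look each suffix up: O(n*k).
--     index = {}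
--     for query in patterns:
--         index.setdefault(query[:-1], []).append(query)
--     adjacency_list = {}
--     for kmer in patterns:
--         neighbours = index.get(kmer[1:])
--         if neighbours:
--             adjacency_list[kmer] = neighbours
--     return adjacency_list
-- ===== Notes on version B (the rewrite author's own statement) =====
-- stated objective: faster
-- what changed: B builds a dict indexing patterns by their (k-1)-prefix in one pass and looks each suffix up, replacing A's inner scan over all patterns.
import Mathlib
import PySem

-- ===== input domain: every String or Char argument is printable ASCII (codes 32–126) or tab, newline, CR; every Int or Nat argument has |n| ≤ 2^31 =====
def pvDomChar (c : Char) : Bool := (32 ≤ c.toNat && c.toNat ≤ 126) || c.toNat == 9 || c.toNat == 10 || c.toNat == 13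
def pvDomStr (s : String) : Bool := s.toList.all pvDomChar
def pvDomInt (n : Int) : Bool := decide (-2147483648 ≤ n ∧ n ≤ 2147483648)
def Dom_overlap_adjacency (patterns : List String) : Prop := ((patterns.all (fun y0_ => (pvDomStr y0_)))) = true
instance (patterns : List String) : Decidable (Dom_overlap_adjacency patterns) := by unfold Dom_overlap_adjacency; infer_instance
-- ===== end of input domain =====

-- B indexes patterns by (k-1)-prefix in a dict built once, replacing A's quadratic inner scan.

-- ===== PORT A =====
def overlap_adjacency (patterns : List String) : List (String × List String) :=
  (patterns.foldl (fun adjacency_list kmer =>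
      let kmer_suffix := PySem.Str.slice kmer (some 1) none
      let kmer_list := patterns.foldl (fun acc query =>
        if PySem.Str.slice query none (some (-1)) == kmer_suffix then acc ++ [query] else acc) []
      if kmer_list ≠ [] then adjacency_list.insert kmer kmer_list else adjacency_list)
    PySem.Dict.empty).items

-- ===== PORT B =====
def overlap_adjacency_alt (patterns : List String) : List (String × List String) :=
  let index := patterns.foldl
    (fun d query => d.modify (PySem.Str.slice query none (some (-1))) [] (· ++ [query]))
    PySem.Dict.empty
  (patterns.foldl (fun adjacency_list kmer =>
      let neighbours := index.getD (PySem.Str.slice kmer (some 1) none) []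
      if neighbours ≠ [] then adjacency_list.insert kmer neighbours else adjacency_list)
    PySem.Dict.empty).items

-- ===== PRECONDITION & SPEC =====
def Spec_overlap_adjacency (patterns : List String) (out : List (String × List String)) : Prop := out = overlap_adjacency_alt patterns
instance (patterns : List String) (out : List (String × List String)) : Decidable (Spec_overlap_adjacency patterns out) := by unfold Spec_overlap_adjacency; infer_instance

-- ===== CLAIM (what is proved, stated in full; the proofs are below) =====
def Claim_equal_overlap_adjacency : Prop := ∀ (patterns : List String), Dom_overlap_adjacency patterns → Spec_overlap_adjacency patterns (overlap_adjacency patterns)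

-- ===== LEMMAS AND PROOFS =====

-- B's index lookup at key c equals the list of patterns whose (k-1)-prefix is c.
theorem index_getD (patterns : List String) (c : String) :
    (patterns.foldl
      (fun d query => d.modify (PySem.Str.slice query none (some (-1))) [] (· ++ [query]))
      PySem.Dict.empty).getD c []
    = patterns.filter (fun q => PySem.Str.slice q none (some (-1)) == c) := by
  have h := PySem.Dict.getD_foldl_modify_append
    (l := patterns.map (fun q => (PySem.Str.slice q none (some (-1)), q)))
    (d := PySem.Dict.empty) (c := c)
  rw [List.foldl_map] at h
  simpa [List.filter_map, Function.comp_def] using h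

theorem inner_eq (patterns : List String) (kmer : String) :
    patterns.foldl (fun acc query =>
      if PySem.Str.slice query none (some (-1)) == PySem.Str.slice kmer (some 1) none
      then acc ++ [query] else acc) []
    = patterns.filter (fun q =>
        PySem.Str.slice q none (some (-1)) == PySem.Str.slice kmer (some 1) none) := by
  simpa using PySem.List.foldl_append_if_eq_filter
    (p := fun q => PySem.Str.slice q none (some (-1)) == PySem.Str.slice kmer (some 1) none)
    (l := patterns) (acc := [])

theorem overlap_adjacency_spec' (patterns : List String) :
    overlap_adjacency patterns = overlap_adjacency_alt patterns := by
  unfold overlap_adjacency overlap_adjacency_alt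
  simp only [inner_eq patterns, index_getD patterns]

-- ===== VERDICT (by name: the statement is the Claim_ definition above) =====
theorem overlap_adjacency_spec : Claim_equal_overlap_adjacency := by
  intro patterns _
  exact overlap_adjacency_spec' patterns
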